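-- pv_equiv track=rewrite | github.com/Derek-Sowards/PY110-119 | practice_problems/easy1/2letter_counter.py | word_sizes
-- ===== SOURCE A (Python) =====
-- def word_sizes(string):
--     split_str = string.split()
--     word_size_dict = {}
--
--     for word in split_str:
--         clean_word = clean_str(word)
--         if len(clean_word) not in word_size_dict.keys():
--             word_size_dict[len(clean_word)] = 1
--         else:
--             word_size_dict[len(clean_word)] += 1
--     return word_size_dict
--
-- def clean_str(string):
--     cleansed = ''
--     for char in string:
--         if char.isalpha():
--             cleansed += char
--     return cleansed
-- ===== SOURCE B (Python) =====
-- def word_sizes(string):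
--     lengths = [sum(c.isalpha() for c in word) for word in string.split()]
--     pairs = []
--     while lengths:
--         size = lengths[0]
--         rest = [n for n in lengths if n != size]
--         pairs.append((size, len(lengths) - len(rest)))
--         lengths = rest
--     return dict(pairs)
-- ===== Notes on version B (the rewrite author's own statement) =====
-- stated objective: alternative
-- what changed: Replaces the hash-accumulation loop (dict membership test + increment per word) with a repeated-partition pass: compute all alphabetic lengths once, then repeatedly take the first remaining length, count its group as the drop in list size when it is filtered out, and recurse on the remainder; no dict is maintained during the computation.
import Mathlib
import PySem

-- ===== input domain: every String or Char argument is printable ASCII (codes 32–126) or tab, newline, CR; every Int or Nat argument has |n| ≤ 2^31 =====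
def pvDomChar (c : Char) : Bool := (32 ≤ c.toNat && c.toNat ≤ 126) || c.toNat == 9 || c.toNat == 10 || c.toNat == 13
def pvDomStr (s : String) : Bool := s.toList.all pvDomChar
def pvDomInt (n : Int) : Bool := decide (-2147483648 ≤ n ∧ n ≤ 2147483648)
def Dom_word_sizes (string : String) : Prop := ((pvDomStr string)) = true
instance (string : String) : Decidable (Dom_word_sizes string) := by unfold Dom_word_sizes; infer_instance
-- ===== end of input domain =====

-- B replaces the hash-accumulation loop with a repeated-partition pass over the list of
-- alphabetic lengths: extract the first group, count it by the size drop, recurse (objective: alternative).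
-- ===== PORT A =====
def clean_str (string : String) : String :=
  String.ofList (string.toList.foldl
    (fun cleansed char => if PySem.Chars.isalpha char then cleansed ++ [char] else cleansed) [])

def word_sizes (string : String) : List (Int × Int) :=
  let split_str := PySem.Str.split₀ string
  let d := split_str.foldl
    (fun d word =>
      let clean_word := clean_str word
      if ¬ d.contains (PySem.Str.len clean_word) then
        d.insert (PySem.Str.len clean_word) 1
      else
        -- d[k] += 1 : the key is present in this branch, so getD _ 0 is exactly d[k]
        d.insert (PySem.Str.len clean_word) (d.getD (PySem.Str.len clean_word) 0 + 1))
    PySem.Dict.empty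
  d.items

-- ===== PORT B =====
-- the while-loop of Source B: peel off the group of the first remaining length, recurse on the rest
def groupPairs (lengths : List Int) : List (Int × Int) :=
  match lengths with
  | [] => []
  | size :: t =>
    let rest := t.filter (fun n => n != size)
    (size, ((size :: t).length : Int) - (rest.length : Int)) :: groupPairs rest
termination_by lengths.length
decreasing_by
  simp only [List.length_cons, List.length_unattach]
  exact Nat.lt_succ_of_le (le_trans (List.length_filter_le _ _) (by simp))

def word_sizes_alt (string : String) : List (Int × Int) :=
  let lengths := (PySem.Str.split₀ string).map
    (fun word => (word.toList.map (fun c => if PySem.Chars.isalpha c then (1 : Int) else 0)).sum)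
  groupPairs lengths

-- ===== PRECONDITION & SPEC =====
def Spec_word_sizes (string : String) (out : List (Int × Int)) : Prop := out = word_sizes_alt string
instance (string : String) (out : List (Int × Int)) : Decidable (Spec_word_sizes string out) := by unfold Spec_word_sizes; infer_instance

-- ===== CLAIM (what is proved, stated in full; the proofs are below) =====
def Claim_equal_word_sizes : Prop := ∀ (string : String), Dom_word_sizes string → Spec_word_sizes string (word_sizes string)

-- ===== LEMMAS AND PROOFS =====

-- the alphabetic length computed by A (via clean_str) equals B's 0/1-sum
lemma keyA_eq_keyB (word : String) :
    PySem.Str.len (clean_str word)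
      = (word.toList.map (fun c => if PySem.Chars.isalpha c then (1 : Int) else 0)).sum := by
  simp [clean_str, PySem.List.foldl_append_if_eq_filter, PySem.List.sum_map_ite_one_zero,
    List.countP_eq_length_filter]

-- A's branching accumulation step is the uniform insert-getD+1 step
lemma fold_step_eq (d : PySem.Dict Int Int) (k : Int) :
    (if ¬ d.contains k then d.insert k 1 else d.insert k (d.getD k 0 + 1))
      = d.insert k (d.getD k 0 + 1) := by
  by_cases h : d.contains k
  · simp [h]
  · have h0 : d.getD k 0 = 0 := PySem.Dict.getD_of_not_contains d 0 (by simpa using h)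
    simp [h, h0]

-- a counting loop keyed by 'key w' is the counting loop over the mapped list
lemma foldl_insert_key (l : List String) (key : String → Int) (d : PySem.Dict Int Int) :
    l.foldl (fun d w => d.insert (key w) (d.getD (key w) 0 + 1)) d
      = (l.map key).foldl (fun d x => d.insert x (d.getD x 0 + 1)) d := by
  induction l generalizing d with
  | nil => rfl
  | cons w t ih => simp [ih]

-- folding Set.add over a list whose duplicates of k are filtered out, from an accumulator headed by k
lemma foldl_add_cons_filter (k : Int) :
    ∀ (l s : List Int),
      l.foldl PySem.Set.add (k :: s)
        = k :: (l.filter (fun n => n != k)).foldl PySem.Set.add s := by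
  intro l
  induction l with
  | nil => intro s; rfl
  | cons x t ih =>
    intro s
    by_cases hx : x = k
    · subst hx
      simp [PySem.Set.add, PySem.Set.contains, ih]
    · by_cases hs : x ∈ s
      · simp [PySem.Set.add, PySem.Set.contains, hx, hs, ih]
      · simp [PySem.Set.add, PySem.Set.contains, hx, hs, ih]

-- first-occurrence dedup peels off the first element and its later duplicates
lemma dedup_cons (k : Int) (t : List Int) :
    PySem.List.dedup (k :: t) = k :: PySem.List.dedup (t.filter (fun n => n != k)) := by
  simp only [PySem.List.dedup_eq_ofList, PySem.Set.ofList_eq_foldl]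
  simpa using foldl_add_cons_filter k t []

-- B's repeated-partition loop computes dedup + count
lemma groupPairs_eq_aux (N : Nat) :
    ∀ l : List Int, l.length ≤ N →
      groupPairs l = (PySem.List.dedup l).map (fun k => (k, (l.count k : Int))) := by
  induction N with
  | zero =>
    intro l hl
    have : l = [] := List.length_eq_zero_iff.mp (Nat.le_zero.mp hl)
    subst this
    simp [groupPairs]
  | succ N ih =>
    intro l hl
    match l with
    | [] => simp [groupPairs]
    | size :: t =>
      have hlen : ∀ m : List Int, (m.filter (fun n => n != size)).length + m.count size = m.length := by
        intro m
        induction m with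
        | nil => simp
        | cons x xs ihm =>
          by_cases hx : x = size <;> simp [hx] <;> omega
      have hrec : (t.filter (fun n => n != size)).length ≤ N := by
        have := List.length_filter_le (fun n => n != size) t
        simp only [List.length_cons] at hl
        omega
      rw [groupPairs, dedup_cons, List.map_cons, ih _ hrec]
      refine congrArg₂ (· :: ·) ?_ ?_
      · have hc : (size :: t).count size = t.count size + 1 := List.count_cons_self ..
        have h2 : (size :: t).length = t.length + 1 := List.length_cons ..
        have h3 := hlen t
        rw [hc, h2]
        push_cast
        congr 1
        omega
      · apply List.map_congr_left
        intro k hk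
        have hk' : k ∈ t.filter (fun n => n != size) := (PySem.List.mem_dedup _ _).mp hk
        have hne : k ≠ size := by simpa using (List.mem_filter.mp hk').2
        rw [List.count_filter (by simpa using hne), List.count_cons_of_ne hne.symm]

lemma groupPairs_eq (l : List Int) :
    groupPairs l = (PySem.List.dedup l).map (fun k => (k, (l.count k : Int))) :=
  groupPairs_eq_aux l.length l le_rfl

theorem word_sizes_spec : Claim_equal_word_sizes := by
  intro string _
  unfold Spec_word_sizes word_sizes word_sizes_alt
  simp only [fold_step_eq, keyA_eq_keyB]
  rw [foldl_insert_key, PySem.Dict.foldl_insert_getD_add_one_eq_counter,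
    PySem.Dict.items_counter, groupPairs_eq]
  simp
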